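-- pv_equiv track=rewrite | github.com/muzammilar/Resources-Algorithms-and-Data-Structures | interviews/codility/easy-leader_count.py | solution
-- ===== SOURCE A (Python) =====
-- from collections import Counter
-- from collections import Counter
--
-- def solution(A):
--     count_dict = dict(Counter(A))
--     leader = max(count_dict, key=count_dict.get)
--     cnt_leader_tot = count_dict[leader]
--     cnt_leader = 0
--     score = 0
--     num_elem = len(A)
--     for idx, x in enumerate(A):
--         if x == leader:
--             cnt_leader += 1
--         if idx+1 < cnt_leader * 2 and num_elem-idx-1 < (cnt_leader_tot - cnt_leader) * 2: # if element seen still have that num as leader on both sides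
--             score += 1
--     return score
-- ===== SOURCE B (Python) =====
-- from collections import Counter
--
-- def solution(A):
--     counts = Counter(A)
--     leader = max(counts, key=counts.get)
--     total = counts[leader]
--     n = len(A)
--     prefix = [0]
--     for x in A:
--         prefix.append(prefix[-1] + (x == leader))
--     score = 0
--     for s in range(n):
--         left = prefix[s + 1]
--         if 2 * left > s + 1 and 2 * (total - left) > n - s - 1:
--             score += 1
--     return score
-- ===== Notes on version B (the rewrite author's own statement) =====
-- stated objective: alternative
-- what changed: A fuses the leader-count accumulator and the score test into one enumerate loop; B first materializes a prefix-count table of the leader in one pass, then scans split points in a second, independent loop comparing 2*left and 2*right against the side lengths.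
import Mathlib
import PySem

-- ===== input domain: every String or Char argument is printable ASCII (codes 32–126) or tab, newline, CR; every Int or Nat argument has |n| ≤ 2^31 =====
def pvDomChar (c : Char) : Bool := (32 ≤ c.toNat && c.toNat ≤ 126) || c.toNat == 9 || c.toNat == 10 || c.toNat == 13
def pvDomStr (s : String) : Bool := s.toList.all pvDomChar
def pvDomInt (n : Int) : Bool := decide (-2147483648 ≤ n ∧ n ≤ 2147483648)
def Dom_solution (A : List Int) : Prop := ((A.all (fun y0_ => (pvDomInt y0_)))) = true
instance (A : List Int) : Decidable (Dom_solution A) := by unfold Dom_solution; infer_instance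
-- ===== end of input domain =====

-- B replaces A's fused counter-and-score loop by a materialized prefix-count table and a
-- separate split-point scan (objective: alternative decomposition, same leader detection).

-- ===== PORT A =====
def solution (A : List Int) : Int :=
  let cd := PySem.Dict.counter A
  match PySem.List.max? cd.keys (fun k => cd.getD k 0) with
  | none => 0  -- Python raises ValueError here (empty A); excluded by Pre_solution
  | some leader =>
    let tot := cd.getD leader 0
    let n : Int := A.length
    ((PySem.List.enumerate A).foldl
      (fun (st : Int × Int) (p : Int × Int) =>
        let cnt := if p.2 = leader then st.1 + 1 else st.1
        (cnt, if p.1 + 1 < cnt * 2 ∧ n - p.1 - 1 < (tot - cnt) * 2 then st.2 + 1 else st.2))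
      (0, 0)).2

-- ===== PORT B =====
def solution_alt (A : List Int) : Int :=
  let cd := PySem.Dict.counter A
  match PySem.List.max? cd.keys (fun k => cd.getD k 0) with
  | none => 0  -- Python raises ValueError here (empty A); excluded by Pre_solution
  | some leader =>
    let tot := cd.getD leader 0
    let n : Int := A.length
    let pre := A.foldl
      (fun acc x => acc ++ [PySem.List.pyGetD acc (-1) 0 + (if x = leader then 1 else 0)]) [0]
    (PySem.List.pyRange 0 n 1).foldl
      (fun sc s =>
        let left := PySem.List.pyGetD pre (s + 1) 0
        if 2 * left > s + 1 ∧ 2 * (tot - left) > n - s - 1 then sc + 1 else sc) 0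

-- ===== PRECONDITION & SPEC =====
-- Pre_ excludes only the empty list, on which Python's max() raises ValueError.
def Pre_solution (A : List Int) : Prop := A ≠ []
instance (A : List Int) : Decidable (Pre_solution A) := by unfold Pre_solution; infer_instance
def pvWitness_solution : List Int := [4, 3, 4, 4, 4, 2]
def Spec_solution (A : List Int) (out : Int) : Prop := out = solution_alt A
instance (A : List Int) (out : Int) : Decidable (Spec_solution A out) := by unfold Spec_solution; infer_instance

-- ===== CLAIM (what is proved, stated in full; the proofs are below) =====
def Claim_equal_solution : Prop := ∀ (A : List Int), Dom_solution A → Pre_solution A → Spec_solution A (solution A)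

-- ===== LEMMAS AND PROOFS =====

-- count of the leader among the first k elements
def pvC (A : List Int) (L : Int) (k : Nat) : Int := ((A.take k).count L : Int)

-- canonical split-point step (B's syntactic shape of the test)
def pvStep (A : List Int) (L tot n : Int) : Int → Nat → Int :=
  fun sc k =>
    if 2 * pvC A L (k + 1) > (k : Int) + 1 ∧ 2 * (tot - pvC A L (k + 1)) > n - (k : Int) - 1
    then sc + 1 else sc

lemma pv_prefix_fold (L : Int) (l : List Int) : ∀ (acc : List Int) (x0 : Int),
    l.foldl (fun acc x => acc ++ [PySem.List.pyGetD acc (-1) 0 + (if x = L then 1 else 0)])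
      (acc ++ [x0])
    = acc ++ List.scanl (fun p x => p + (if x = L then 1 else 0)) x0 l := by
  induction l with
  | nil => intro acc x0; simp [List.scanl_nil]
  | cons x xs ih =>
    intro acc x0
    simp only [List.foldl_cons, List.scanl_cons, PySem.List.pyGetD_neg_one_append_singleton]
    rw [ih (acc ++ [x0]) (x0 + (if x = L then 1 else 0))]
    simp

lemma pv_scanl_getD (L : Int) (l : List Int) : ∀ (b : Int) (k : Nat), k ≤ l.length →
    (List.scanl (fun p x => p + (if x = L then 1 else 0)) b l).getD k 0
    = (l.take k).foldl (fun p x => p + (if x = L then 1 else 0)) b := by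
  induction l with
  | nil =>
    intro b k hk
    have : k = 0 := by simpa using hk
    subst this; simp [List.scanl_nil]
  | cons x xs ih =>
    intro b k hk
    cases k with
    | zero => simp [List.scanl_cons]
    | succ k =>
      simp only [List.scanl_cons, List.take_succ_cons, List.foldl_cons, List.getD_cons_succ]
      exact ih _ k (by simpa using hk)

lemma pv_foldg (L : Int) (l : List Int) : ∀ (b : Int),
    l.foldl (fun p x => p + (if x = L then 1 else 0)) b = b + (l.count L : Int) := by
  induction l with
  | nil => intro b; simp
  | cons x xs ih =>
    intro b
    simp only [List.foldl_cons, ih, List.count_cons]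
    by_cases h : x = L
    · simp [h]; ring
    · simp [h]

lemma pv_c_succ (A : List Int) (L x : Int) (rest : List Int) (i : Nat)
    (h : A.drop i = x :: rest) :
    pvC A L (i + 1) = pvC A L i + (if x = L then 1 else 0) := by
  have h0 : (A.drop i)[0]? = some x := by rw [h]; rfl
  rw [List.getElem?_drop] at h0
  unfold pvC
  rw [List.take_add_one]
  simp only [Nat.add_zero] at h0
  rw [h0]
  simp only [Option.toList_some, List.count_append, List.count_cons, List.count_nil]
  by_cases hxl : x = L <;> simp [hxl]

lemma pv_loopA (A : List Int) (L tot n : Int) : ∀ (rest : List Int) (i : Nat),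
    rest = A.drop i → ∀ (sc : Int),
    ((PySem.List.enumerate rest (i : Int)).foldl
      (fun (st : Int × Int) (p : Int × Int) =>
        (if p.2 = L then st.1 + 1 else st.1,
         if p.1 + 1 < (if p.2 = L then st.1 + 1 else st.1) * 2 ∧
            n - p.1 - 1 < (tot - (if p.2 = L then st.1 + 1 else st.1)) * 2
         then st.2 + 1 else st.2))
      (pvC A L i, sc)).2
    = (List.range' i rest.length).foldl (pvStep A L tot n) sc := by
  intro rest
  induction rest with
  | nil => intro i _ sc; simp [PySem.List.enumerate]
  | cons x xs ih =>
    intro i hdrop sc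
    have hcnt : (if x = L then pvC A L i + 1 else pvC A L i) = pvC A L (i + 1) := by
      rw [pv_c_succ A L x xs i hdrop.symm]; by_cases h : x = L <;> simp [h]
    have hxs : xs = A.drop (i + 1) := by
      have := congrArg (List.drop 1) hdrop
      simpa [List.drop_drop, Nat.add_comm] using this
    simp only [PySem.List.enumerate_cons, List.foldl_cons]
    simp only [hcnt]
    rw [show (i : Int) + 1 = ((i + 1 : Nat) : Int) by push_cast; ring]
    rw [ih (i + 1) hxs]
    simp only [List.length_cons, List.range'_succ, List.foldl_cons]
    congr 1
    simp only [pvStep]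
    split_ifs <;> omega

lemma pv_loopB (A : List Int) (L tot : Int) :
    (PySem.List.pyRange 0 (A.length : Int) 1).foldl
      (fun sc s =>
        if 2 * PySem.List.pyGetD
              (List.scanl (fun p x => p + (if x = L then 1 else 0)) 0 A) (s + 1) 0 > s + 1 ∧
           2 * (tot - PySem.List.pyGetD
              (List.scanl (fun p x => p + (if x = L then 1 else 0)) 0 A) (s + 1) 0)
             > (A.length : Int) - s - 1
        then sc + 1 else sc) 0
    = (List.range A.length).foldl (pvStep A L tot (A.length : Int)) 0 := by
  rw [PySem.List.pyRange_zero_natCast, List.foldl_map]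
  apply PySem.List.foldl_congr_mem
  intro acc k hk
  have hk' : k < A.length := List.mem_range.mp hk
  rw [show ((k : Int) + 1) = ((k + 1 : Nat) : Int) by push_cast; ring]
  rw [PySem.List.pyGetD_natCast, pv_scanl_getD L A 0 (k + 1) (by omega), pv_foldg]
  simp only [pvStep, pvC, zero_add]
  push_cast
  rfl

-- ===== VERDICT (by name: the statement is the Claim_ definition above) =====
theorem solution_spec : Claim_equal_solution := by
  unfold Claim_equal_solution
  intro A _hd _hp
  unfold Spec_solution solution solution_alt
  cases h : PySem.List.max? (PySem.Dict.counter A).keys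
      (fun k => (PySem.Dict.counter A).getD k 0) with
  | none => simp only [h]
  | some L =>
    simp only [h]
    rw [show ([0] : List Int) = [] ++ [0] from rfl, pv_prefix_fold L A [] 0, List.nil_append]
    rw [pv_loopB A L ((PySem.Dict.counter A).getD L 0)]
    have hA := pv_loopA A L ((PySem.Dict.counter A).getD L 0) (A.length : Int) A 0 rfl 0
    simp only [pvC, List.take_zero, List.count_nil, Nat.cast_zero] at hA
    rw [hA, List.range_eq_range']
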